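-- pv_equiv track=rewrite | github.com/fly-dust/CoolPing | ping.py | get_int_after
-- ===== SOURCE A (Python) =====
-- def get_int_after(s, f): # A function for searching value
--     S = s.upper()
--     F = f.upper()
--     par = S.partition(F)
--     int_str = ""
--     for c in par[2]:
--         if c in ("-", "0", "1", "2", "3", "4", "5", "6", "7", "8", "9"):
--             int_str += c
--         else:
--             if c == ":" or c == "=" or c == " ":
--                 if int_str == "":
--                     continue
--             break
--     try:
--         return int(int_str)
--     except: #Timeout
--         return 0
-- ===== SOURCE B (Python) =====
-- def get_int_after(s, f):
--     # Two-phase decomposition: partition, strip the leading separator run,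
--     # then slice off the maximal leading run of '-'/digits and parse it.
--     after = s.upper().partition(f.upper())[2]
--     stripped = after.lstrip(':= ')
--     end = next((i for i, c in enumerate(stripped) if c not in '-0123456789'),
--                len(stripped))
--     try:
--         return int(stripped[:end])
--     except ValueError:
--         return 0
-- ===== Notes on version B (the rewrite author's own statement) =====
-- stated objective: simpler
-- what changed: A's single stateful loop (collect digits, skip ':= ' only while the accumulator is empty, break otherwise) is split into two stateless phases: lstrip(':= ') to drop the leading separator run, then slicing off the maximal leading run of '-'/digit characters before one int() parse.
-- outside the precondition, e.g. on get_int_after('abc', ''): A raises ValueError, B raises ValueError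
import Mathlib
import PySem

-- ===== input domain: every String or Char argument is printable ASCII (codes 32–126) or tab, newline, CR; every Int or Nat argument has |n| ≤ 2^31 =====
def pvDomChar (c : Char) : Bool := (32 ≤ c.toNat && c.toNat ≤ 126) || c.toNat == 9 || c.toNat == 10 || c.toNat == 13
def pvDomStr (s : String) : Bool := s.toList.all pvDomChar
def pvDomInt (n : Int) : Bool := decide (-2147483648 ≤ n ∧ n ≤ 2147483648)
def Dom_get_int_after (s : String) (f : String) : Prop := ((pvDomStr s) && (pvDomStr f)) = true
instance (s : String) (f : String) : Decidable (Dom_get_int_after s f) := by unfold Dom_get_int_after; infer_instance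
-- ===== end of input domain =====

-- B replaces A's stateful collect-or-skip loop by two phases (lstrip the separator run, then slice
-- the maximal leading '-'/digit run); equivalence of return values is proved on f ≠ "".

-- shared helper: S.partition(F)[2] for F ≠ [] (exact: empty third part when F does not occur)
def pvPartitionTail (S F : List Char) : List Char :=
  let i := PySem.Chars.find S F
  if i = -1 then [] else S.drop (i.toNat + F.length)

-- ===== PORT A =====
def pvDigits : List Char := ['-', '0', '1', '2', '3', '4', '5', '6', '7', '8', '9']

-- A's for-loop with break/continue: collect digit chars; skip ':' '=' ' ' while int_str empty; else break
def pvLoopA (acc : List Char) : List Char → List Char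
  | [] => acc
  | c :: rest =>
    if pvDigits.contains c then pvLoopA (acc ++ [c]) rest
    else if (c = ':' ∨ c = '=' ∨ c = ' ') ∧ acc = [] then pvLoopA acc rest
    else acc

def get_int_after (s : String) (f : String) : Int :=
  let S := PySem.Chars.upper s.toList
  let F := PySem.Chars.upper f.toList
  let int_str := pvLoopA [] (pvPartitionTail S F)
  (PySem.Int.ofChars? int_str).getD 0

-- ===== PORT B =====
def get_int_after_alt (s : String) (f : String) : Int :=
  let S := PySem.Chars.upper s.toList
  let F := PySem.Chars.upper f.toList
  let after := pvPartitionTail S F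
  -- after.lstrip(':= ')
  let stripped := after.dropWhile (fun c => [':', '=', ' '].contains c)
  -- next((i for i, c in enumerate(stripped) if c not in '-0123456789'), len(stripped))
  let stop := stripped.findIdx (fun c => !pvDigits.contains c)
  (PySem.Int.ofChars? (stripped.take stop)).getD 0

-- ===== PRECONDITION & SPEC =====
-- Pre_ excludes only f = "", where A's str.partition raises ValueError ("empty separator")
def Pre_get_int_after (s : String) (f : String) : Prop := f ≠ ""
instance (s : String) (f : String) : Decidable (Pre_get_int_after s f) := by unfold Pre_get_int_after; infer_instance
def pvWitness_get_int_after : String × String := ("speed=12 x", "SPEED")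

def Spec_get_int_after (s : String) (f : String) (out : Int) : Prop := out = get_int_after_alt s f
instance (s : String) (f : String) (out : Int) : Decidable (Spec_get_int_after s f out) := by unfold Spec_get_int_after; infer_instance

-- ===== CLAIM (what is proved, stated in full; the proofs are below) =====
def Claim_equal_get_int_after : Prop := ∀ (s : String) (f : String), Dom_get_int_after s f → Pre_get_int_after s f → Spec_get_int_after s f (get_int_after s f)

-- ===== LEMMAS AND PROOFS =====

-- once int_str is nonempty, A's loop keeps exactly the maximal leading digit run
lemma pvLoopA_ne (l : List Char) (acc : List Char) (h : acc ≠ []) :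
    pvLoopA acc l = acc ++ l.takeWhile (fun c => pvDigits.contains c) := by
  induction l generalizing acc with
  | nil => simp [pvLoopA]
  | cons c rest ih =>
    by_cases hd : c ∈ pvDigits
    · have h1 : pvLoopA acc (c :: rest) = pvLoopA (acc ++ [c]) rest := by simp [pvLoopA, hd]
      rw [h1, ih (acc ++ [c]) (by simp)]
      simp [hd]
    · simp [pvLoopA, hd, h]

-- A's whole loop from the empty accumulator = drop the leading separator run, then the digit run
lemma pvLoopA_nil (l : List Char) :
    pvLoopA [] l =
      (l.dropWhile (fun c => [':', '=', ' '].contains c)).takeWhile (fun c => pvDigits.contains c) := by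
  induction l with
  | nil => simp [pvLoopA]
  | cons c rest ih =>
    by_cases hd : c ∈ pvDigits
    · have hns : ¬(c = ':' ∨ c = '=' ∨ c = ' ') := by
        simp only [pvDigits, List.mem_cons, List.not_mem_nil, or_false] at hd
        rcases hd with h|h|h|h|h|h|h|h|h|h|h <;> subst h <;> decide
      push Not at hns
      obtain ⟨h1, h2, h3⟩ := hns
      have he : pvLoopA [] (c :: rest) = pvLoopA [c] rest := by simp [pvLoopA, hd]
      rw [he, pvLoopA_ne rest [c] (by simp)]
      simp [hd, h1, h2, h3]
    · by_cases hsep : c = ':' ∨ c = '=' ∨ c = ' '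
      · have hc : ([':', '=', ' '].contains c) = true := by
          rcases hsep with h | h | h <;> simp [h]
        simp [pvLoopA, hd, hsep, ih]
      · push Not at hsep
        obtain ⟨h1, h2, h3⟩ := hsep
        simp [pvLoopA, hd, h1, h2, h3]

-- ===== VERDICT (by name: the statement is the Claim_ definition above) =====
theorem get_int_after_spec : Claim_equal_get_int_after := by
  intro s f _ _
  unfold Spec_get_int_after get_int_after get_int_after_alt
  simp only [pvLoopA_nil, List.takeWhile_eq_take_findIdx_not]
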